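-- pv_equiv track=rewrite | github.com/42-Iniciativa-Open-Source/backend | src/tests/endpoints.py | fill_ids
-- ===== SOURCE A (Python) =====
-- from functools import reduce
--
-- def fill_ids(endpoints: list) -> list:
--     filled_endpoints = []
--     for endpoint in endpoints:
--       if ':' in endpoint:
--         replaces = (":user_id", "66504"), (":id", "9"), (":cursus_id", "21"), (":campus_id", "20"), (":project_id", "1874"), (":project_sessions_id", "5249"), (":achievement_id", "1"), (":bloc_id", "1"), (":close_id", "1"), (":team_id", "31"), (":event_id", "5376"), (":tag_id", "1"), (":project_session_id", "5249"), (":skill_id", "1"), (":role_id", "1"), (":notion_id", "1"), (":partnership_id", "563"), (":issue_id", "1"), (":quest_id", "1"), (":title_id", "27"), (":coalition_id", "1"), (":product_id", "1"), (":dash_id", "1"), (":group_id", "1"), (":expertise_id", "1"), (":accreditation_id", "1"), (":scale_team_id", "1"), (":field", "created_at"), (":interval", "day")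
--         filled_endpoints.append(reduce(lambda a, kv: a.replace(*kv), replaces, endpoint))
--         continue
--       filled_endpoints.append(endpoint)
--     return filled_endpoints
-- ===== SOURCE B (Python) =====
-- _TABLE = [(":user_id", "66504"), (":id", "9"), (":cursus_id", "21"), (":campus_id", "20"), (":project_id", "1874"), (":project_sessions_id", "5249"), (":achievement_id", "1"), (":bloc_id", "1"), (":close_id", "1"), (":team_id", "31"), (":event_id", "5376"), (":tag_id", "1"), (":project_session_id", "5249"), (":skill_id", "1"), (":role_id", "1"), (":notion_id", "1"), (":partnership_id", "563"), (":issue_id", "1"), (":quest_id", "1"), (":title_id", "27"), (":coalition_id", "1"), (":product_id", "1"), (":dash_id", "1"), (":group_id", "1"), (":expertise_id", "1"), (":accreditation_id", "1"), (":scale_team_id", "1"), (":field", "created_at"), (":interval", "day")]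
--
-- def fill_ids(endpoints: list) -> list:
--     # One left-to-right pass per endpoint: at each ':' try the placeholder table
--     # (no key is a prefix of another, so a single pass equals A's replace chain).
--     filled_endpoints = []
--     for endpoint in endpoints:
--         out = []
--         i = 0
--         n = len(endpoint)
--         while i < n:
--             if endpoint[i] == ':':
--                 for key, value in _TABLE:
--                     if endpoint.startswith(key, i):
--                         out.append(value)
--                         i += len(key)
--                         break
--                 else:
--                     out.append(':')
--                     i += 1
--             else:
--                 out.append(endpoint[i])
--                 i += 1
--         filled_endpoints.append(''.join(out))
--     return filled_endpoints
-- ===== Notes on version B (the rewrite author's own statement) =====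
-- stated objective: alternative
-- what changed: A folds 29 sequential full-string str.replace passes over each endpoint; B makes a single left-to-right scan per endpoint, consulting the placeholder table only at ':' characters (valid because no placeholder is a prefix of another and no replacement value re-creates a later placeholder).
import Mathlib
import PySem

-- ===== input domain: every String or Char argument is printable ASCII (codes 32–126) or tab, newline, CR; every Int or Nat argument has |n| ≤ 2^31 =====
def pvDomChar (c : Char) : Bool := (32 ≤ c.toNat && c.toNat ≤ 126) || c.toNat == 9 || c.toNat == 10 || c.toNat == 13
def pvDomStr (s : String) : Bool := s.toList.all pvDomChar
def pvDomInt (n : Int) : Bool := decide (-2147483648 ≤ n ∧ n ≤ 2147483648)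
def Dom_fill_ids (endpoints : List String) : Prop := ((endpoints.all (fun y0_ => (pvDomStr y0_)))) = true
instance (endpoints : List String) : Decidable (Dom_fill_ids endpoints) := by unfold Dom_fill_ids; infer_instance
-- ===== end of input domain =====

-- B replaces A's chain of 29 sequential full-string str.replace passes by ONE left-to-right
-- scan per endpoint that consults the placeholder table only at ':' characters; equal because
-- no placeholder key is a prefix of another and no replacement value re-creates a later key.

-- ===== PORT A =====
-- the `replaces` tuple of A, in A's order
def pvReplaces : List (String × String) :=
  [(":user_id", "66504"), (":id", "9"), (":cursus_id", "21"), (":campus_id", "20"),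
   (":project_id", "1874"), (":project_sessions_id", "5249"), (":achievement_id", "1"),
   (":bloc_id", "1"), (":close_id", "1"), (":team_id", "31"), (":event_id", "5376"),
   (":tag_id", "1"), (":project_session_id", "5249"), (":skill_id", "1"), (":role_id", "1"),
   (":notion_id", "1"), (":partnership_id", "563"), (":issue_id", "1"), (":quest_id", "1"),
   (":title_id", "27"), (":coalition_id", "1"), (":product_id", "1"), (":dash_id", "1"),
   (":group_id", "1"), (":expertise_id", "1"), (":accreditation_id", "1"),
   (":scale_team_id", "1"), (":field", "created_at"), (":interval", "day")]

def fill_ids (endpoints : List String) : List String :=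
  endpoints.foldl (fun filled endpoint =>
    if PySem.Str.isIn ":" endpoint then
      filled ++ [pvReplaces.foldl (fun a kv => PySem.Str.replace a kv.1 kv.2) endpoint]
    else
      filled ++ [endpoint]) []

-- ===== PORT B =====
-- the same table, as character lists (Source B's _TABLE)
def pvTable : List (List Char × List Char) :=
  [(":user_id".toList, "66504".toList),
   (":id".toList, "9".toList),
   (":cursus_id".toList, "21".toList),
   (":campus_id".toList, "20".toList),
   (":project_id".toList, "1874".toList),
   (":project_sessions_id".toList, "5249".toList),
   (":achievement_id".toList, "1".toList),
   (":bloc_id".toList, "1".toList),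
   (":close_id".toList, "1".toList),
   (":team_id".toList, "31".toList),
   (":event_id".toList, "5376".toList),
   (":tag_id".toList, "1".toList),
   (":project_session_id".toList, "5249".toList),
   (":skill_id".toList, "1".toList),
   (":role_id".toList, "1".toList),
   (":notion_id".toList, "1".toList),
   (":partnership_id".toList, "563".toList),
   (":issue_id".toList, "1".toList),
   (":quest_id".toList, "1".toList),
   (":title_id".toList, "27".toList),
   (":coalition_id".toList, "1".toList),
   (":product_id".toList, "1".toList),
   (":dash_id".toList, "1".toList),
   (":group_id".toList, "1".toList),
   (":expertise_id".toList, "1".toList),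
   (":accreditation_id".toList, "1".toList),
   (":scale_team_id".toList, "1".toList),
   (":field".toList, "created_at".toList),
   (":interval".toList, "day".toList)]

-- Source B's while-loop over one endpoint: at ':' try the table (first match wins), else copy the char
def pvScan : List Char → List Char
  | [] => []
  | c :: t =>
    if c = ':' then
      match pvTable.find? (fun kv => kv.1.isPrefixOf (c :: t)) with
      | some kv => kv.2 ++ pvScan (t.drop (kv.1.length - 1))
      | none => c :: pvScan t
    else c :: pvScan t
termination_by s => s.length
decreasing_by all_goals simp [List.length_drop]

def fill_ids_alt (endpoints : List String) : List String :=
  endpoints.foldl (fun filled endpoint =>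
    filled ++ [String.ofList (pvScan endpoint.toList)]) []

-- ===== PRECONDITION & SPEC =====
def Spec_fill_ids (endpoints : List String) (out : List String) : Prop := out = fill_ids_alt endpoints
instance (endpoints : List String) (out : List String) : Decidable (Spec_fill_ids endpoints out) := by unfold Spec_fill_ids; infer_instance

-- ===== CLAIM (what is proved, stated in full; the proofs are below) =====
def Claim_equal_fill_ids : Prop := ∀ (endpoints : List String), Dom_fill_ids endpoints → Spec_fill_ids endpoints (fill_ids endpoints)

-- ===== LEMMAS AND PROOFS =====

-- ---- recursion equations for PySem.Chars.replace ----

lemma go_succ_cons (old new : List Char) (fuel : Nat) (c : Char) (t acc : List Char) :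
    PySem.Chars.replace.go old new (fuel+1) (c::t) acc =
      if old.isPrefixOf (c::t) then PySem.Chars.replace.go old new fuel (List.drop old.length (c::t)) (new.reverse ++ acc)
      else PySem.Chars.replace.go old new fuel t (c::acc) := by
  rw [PySem.Chars.replace.go]

lemma go_acc (old new : List Char) : ∀ fuel l acc, PySem.Chars.replace.go old new fuel l acc = acc.reverse ++ PySem.Chars.replace.go old new fuel l []
  | 0, l, acc => by simp [PySem.Chars.replace.go]
  | fuel+1, [], acc => by simp [PySem.Chars.replace.go]
  | fuel+1, c::t, acc => by
    rw [PySem.Chars.replace.go, PySem.Chars.replace.go]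
    split
    · rw [go_acc old new fuel (List.drop old.length (c::t)) (new.reverse ++ acc),
        go_acc old new fuel (List.drop old.length (c::t)) (new.reverse ++ [])]
      simp
    · rw [go_acc old new fuel t (c :: acc), go_acc old new fuel t (c :: [])]
      simp

lemma go_fuel (old new : List Char) (hold : old ≠ []) : ∀ f1 f2 l acc, l.length ≤ f1 → l.length ≤ f2 →
    PySem.Chars.replace.go old new f1 l acc = PySem.Chars.replace.go old new f2 l acc
  | 0, f2, l, acc, h1, h2 => by
    have : l = [] := List.eq_nil_of_length_eq_zero (Nat.le_zero.mp h1)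
    subst this
    cases f2 <;> simp [PySem.Chars.replace.go]
  | f1+1, f2, l, acc, h1, h2 => by
    match l, f2 with
    | [], 0 => simp [PySem.Chars.replace.go]
    | [], f2+1 => simp [PySem.Chars.replace.go]
    | c::t, f2+1 =>
      rw [go_succ_cons, go_succ_cons]
      split
      · have hlen : 0 < old.length := List.length_pos_iff.mpr hold
        have hd : (List.drop old.length (c::t)).length ≤ f1 := by
          simp at h1 ⊢; omega
        have hd2 : (List.drop old.length (c::t)).length ≤ f2 := by
          simp at h2 ⊢; omega
        exact go_fuel old new hold f1 f2 _ _ hd hd2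
      · exact go_fuel old new hold f1 f2 t (c::acc) (by simp at h1; omega) (by simp at h2; omega)

lemma rep_nil (old new : List Char) (hold : old ≠ []) : PySem.Chars.replace [] old new = [] := by
  rw [PySem.Chars.replace]
  simp [hold, PySem.Chars.replace.go]

lemma rep_cons_ne (old new : List Char) (c : Char) (t : List Char) (hold : old ≠ [])
    (h : old.isPrefixOf (c::t) = false) :
    PySem.Chars.replace (c::t) old new = c :: PySem.Chars.replace t old new := by
  have he : old.isEmpty = false := by simpa using hold
  rw [PySem.Chars.replace, PySem.Chars.replace]
  simp only [he, Bool.false_eq_true, if_neg, not_false_iff, List.length_cons]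
  rw [go_succ_cons]
  simp [h, go_acc old new t.length t [c]]

lemma rep_match (old new l : List Char) (hold : old ≠ []) (h : old.isPrefixOf l = true) :
    PySem.Chars.replace l old new = new ++ PySem.Chars.replace (l.drop old.length) old new := by
  match l with
  | [] =>
    cases old with
    | nil => exact absurd rfl hold
    | cons a b => simp [List.isPrefixOf] at h
  | c::t =>
    have he : old.isEmpty = false := by simpa using hold
    rw [PySem.Chars.replace, PySem.Chars.replace]
    simp only [he, Bool.false_eq_true, if_neg, not_false_iff, List.length_cons]
    rw [go_succ_cons]
    simp only [h, if_pos]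
    rw [go_acc old new t.length _ (new.reverse ++ [])]
    have hlen : 0 < old.length := List.length_pos_iff.mpr hold
    rw [go_fuel old new hold t.length (List.drop old.length (c::t)).length _ [] (by simp; omega) le_rfl]
    simp

lemma notpre {old l : List Char} (h : ¬ old <+: l) : old.isPrefixOf l = false := by
  cases hb : old.isPrefixOf l with
  | false => rfl
  | true => exact absurd (List.isPrefixOf_iff_prefix.mp hb) h

lemma rep_seg (old new : List Char) (hold : old ≠ []) (x : List Char)
    (hx : ∀ i < x.length, ∀ y : List Char, ¬ old <+: (x.drop i ++ y)) :
    ∀ y, PySem.Chars.replace (x ++ y) old new = x ++ PySem.Chars.replace y old new := by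
  induction x with
  | nil => intro y; simp
  | cons c x' ih =>
    intro y
    have h0 : ¬ old <+: (c :: (x' ++ y)) := by simpa using hx 0 (by simp) y
    rw [List.cons_append, rep_cons_ne old new c (x'++y) hold (notpre h0)]
    rw [ih (fun i hi y' => by simpa using hx (i+1) (by simpa using Nat.succ_lt_succ hi) y') y]
    simp

-- ---- the replace chain as a fold, and its shape hypotheses ----

def fRep (a : List Char) (kv : List Char × List Char) : List Char := PySem.Chars.replace a kv.1 kv.2

-- every key is ':' followed by a nonempty ':'-free name; every value is nonempty and ':'-free
abbrev KeyOk (kv : List Char × List Char) : Prop :=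
  kv.1.head? = some ':' ∧ kv.1.tail ≠ [] ∧ ':' ∉ kv.1.tail ∧ ':' ∉ kv.2 ∧ kv.2 ≠ []

-- no key's name is a prefix of another's
abbrev Rnc (a b : List Char × List Char) : Prop :=
  ¬ a.1.tail <+: b.1.tail ∧ ¬ b.1.tail <+: a.1.tail

-- the value of a cannot complete (nor be swallowed by) any suffix-piece of the name nm
abbrev NCr (a : List Char × List Char) (nm : List Char) : Prop :=
  ∀ i < nm.length, ¬ nm.drop i <+: a.2 ∧ ¬ a.2 <+: nm.drop i

lemma keyok_eq {kv : List Char × List Char} (h : KeyOk kv) : kv.1 = ':' :: kv.1.tail := by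
  obtain ⟨h1, -⟩ := h
  cases hv : kv.1 with
  | nil => rw [hv] at h1; simp at h1
  | cons a b => rw [hv] at h1; simp at h1; simp [h1]

lemma keyok_ne {kv : List Char × List Char} (h : KeyOk kv) : kv.1 ≠ [] := by
  rw [keyok_eq h]; simp

lemma table_keyok : ∀ kv ∈ pvTable, KeyOk kv := by decide
lemma table_rnc : List.Pairwise Rnc pvTable := by decide
lemma table_ncr : List.Pairwise (fun a b => NCr a b.1.tail) pvTable := by decide

-- ---- fold-level shape lemmas ----

lemma fold_nil (ps : List (List Char × List Char)) (hk : ∀ kv ∈ ps, KeyOk kv) :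
    List.foldl fRep [] ps = [] := by
  induction ps with
  | nil => rfl
  | cons kv ps ih =>
    rw [List.foldl_cons]
    show List.foldl fRep (PySem.Chars.replace [] kv.1 kv.2) ps = []
    rw [rep_nil kv.1 kv.2 (keyok_ne (hk kv (by simp)))]
    exact ih (fun x hx => hk x (by simp [hx]))

lemma fold_cons_ne (c : Char) (hc : c ≠ ':') (ps : List (List Char × List Char))
    (hk : ∀ kv ∈ ps, KeyOk kv) :
    ∀ y, List.foldl fRep (c :: y) ps = c :: List.foldl fRep y ps := by
  induction ps with
  | nil => intro y; rfl
  | cons kv ps ih =>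
    intro y
    have hkv := hk kv (by simp)
    have hnp : ¬ kv.1 <+: (c :: y) := by
      rw [keyok_eq hkv]
      intro h
      exact hc (List.cons_prefix_cons.mp h).1.symm
    rw [List.foldl_cons, List.foldl_cons]
    show List.foldl fRep (PySem.Chars.replace (c::y) kv.1 kv.2) ps = c :: List.foldl fRep (fRep y kv) ps
    rw [rep_cons_ne kv.1 kv.2 c y (keyok_ne hkv) (notpre hnp)]
    exact ih (fun x hx => hk x (by simp [hx])) (fRep y kv)

lemma fold_seg (ps : List (List Char × List Char)) (hk : ∀ kv ∈ ps, KeyOk kv) (x : List Char)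
    (hx : ∀ kv ∈ ps, ∀ i < x.length, ∀ y : List Char, ¬ kv.1 <+: (x.drop i ++ y)) :
    ∀ y, List.foldl fRep (x ++ y) ps = x ++ List.foldl fRep y ps := by
  induction ps with
  | nil => intro y; rfl
  | cons kv ps ih =>
    intro y
    rw [List.foldl_cons, List.foldl_cons]
    show List.foldl fRep (PySem.Chars.replace (x ++ y) kv.1 kv.2) ps = x ++ List.foldl fRep (fRep y kv) ps
    rw [rep_seg kv.1 kv.2 (keyok_ne (hk kv (by simp))) x (hx kv (by simp)) y]
    exact ih (fun a ha => hk a (by simp [ha])) (fun a ha => hx a (by simp [ha])) (fRep y kv)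

-- the fold fires key kv at the front of ':' :: kv-name ++ r, and touches nothing else there
lemma match_decomp (ps₁ ps₂ : List (List Char × List Char)) (kv : List Char × List Char)
    (hk : ∀ x ∈ ps₁ ++ kv :: ps₂, KeyOk x) (hrnc : List.Pairwise Rnc (ps₁ ++ kv :: ps₂))
    (r : List Char) :
    List.foldl fRep (':' :: (kv.1.tail ++ r)) (ps₁ ++ kv :: ps₂) =
      kv.2 ++ List.foldl fRep r (ps₁ ++ kv :: ps₂) := by
  have hkv : KeyOk kv := hk kv (by simp)
  have hk1 : ∀ x ∈ ps₁, KeyOk x := fun x hx => hk x (by simp [hx])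
  have hk2 : ∀ x ∈ ps₂, KeyOk x := fun x hx => hk x (by simp [hx])
  have hrnc1 : ∀ x ∈ ps₁, Rnc x kv := by
    have := (List.pairwise_append.mp hrnc).2.2
    exact fun x hx => this x hx kv (by simp)
  -- step 1: ps₁ passes through the segment ':' :: kv.1.tail
  have hseg1 : ∀ y, List.foldl fRep ((':' :: kv.1.tail) ++ y) ps₁ = (':' :: kv.1.tail) ++ List.foldl fRep y ps₁ := by
    apply fold_seg ps₁ hk1
    intro x hx i hi y
    have hxok := hk1 x hx
    match i with
    | 0 =>
      intro hp
      simp only [List.drop_zero, List.cons_append] at hp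
      rw [keyok_eq hxok] at hp
      have h2 := (List.cons_prefix_cons.mp hp).2
      have hcomp := List.prefix_or_prefix_of_prefix h2 (List.prefix_append kv.1.tail y)
      rcases hcomp with h | h
      · exact (hrnc1 x hx).1 h
      · exact (hrnc1 x hx).2 h
    | i+1 =>
      intro hp
      simp only [List.length_cons] at hi
      have hi' : i < kv.1.tail.length := by omega
      have hdrop : (':' :: kv.1.tail).drop (i+1) = kv.1.tail.drop i := by simp
      rw [hdrop] at hp
      cases hd : kv.1.tail.drop i with
      | nil =>
        have hle : kv.1.tail.length ≤ i := List.drop_eq_nil_iff.mp hd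
        omega
      | cons a as =>
        rw [hd, keyok_eq hxok, List.cons_append] at hp
        have ha : a = ':' := ((List.cons_prefix_cons.mp hp).1).symm
        have hmem : a ∈ kv.1.tail := by
          have : a ∈ kv.1.tail.drop i := by rw [hd]; simp
          exact List.mem_of_mem_drop this
        rw [ha] at hmem
        exact hkv.2.2.1 hmem
  -- step 3: ps₂ passes through the segment kv.2
  have hseg2 : ∀ y, List.foldl fRep (kv.2 ++ y) ps₂ = kv.2 ++ List.foldl fRep y ps₂ := by
    apply fold_seg ps₂ hk2
    intro x hx i hi y hp
    cases hd : kv.2.drop i with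
    | nil =>
      have hle : kv.2.length ≤ i := List.drop_eq_nil_iff.mp hd
      omega
    | cons a as =>
      rw [hd, keyok_eq (hk2 x hx), List.cons_append] at hp
      have ha : a = ':' := ((List.cons_prefix_cons.mp hp).1).symm
      have hmem : a ∈ kv.2 := by
        have : a ∈ kv.2.drop i := by rw [hd]; simp
        exact List.mem_of_mem_drop this
      rw [ha] at hmem
      exact hkv.2.2.2.1 hmem
  -- assemble
  rw [List.foldl_append, List.foldl_append, List.foldl_cons, List.foldl_cons]
  have e1 : List.foldl fRep (':' :: (kv.1.tail ++ r)) ps₁ = (':' :: kv.1.tail) ++ List.foldl fRep r ps₁ := by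
    have := hseg1 r
    simpa using this
  rw [e1]
  have e2 : fRep ((':' :: kv.1.tail) ++ List.foldl fRep r ps₁) kv = kv.2 ++ fRep (List.foldl fRep r ps₁) kv := by
    show PySem.Chars.replace ((':' :: kv.1.tail) ++ List.foldl fRep r ps₁) kv.1 kv.2 = _
    have hpre : kv.1.isPrefixOf ((':' :: kv.1.tail) ++ List.foldl fRep r ps₁) = true := by
      rw [List.isPrefixOf_iff_prefix, keyok_eq hkv]
      exact List.prefix_append _ _
    rw [rep_match kv.1 kv.2 _ (keyok_ne hkv) hpre]
    have hdrop : ((':' :: kv.1.tail) ++ List.foldl fRep r ps₁).drop kv.1.length = List.foldl fRep r ps₁ := by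
      have hlen : kv.1.length = kv.1.tail.length + 1 := by rw [keyok_eq hkv]; simp
      rw [hlen]
      exact List.drop_left
    rw [hdrop]
    rfl
  rw [e2, hseg2]


-- when no remaining name matches t (and partial folds cannot create a match: hypothesis h2),
-- the whole chain passes the leading ':' through
lemma pass_colon (t : List Char) (ps : List (List Char × List Char))
    (hk : ∀ kv ∈ ps, KeyOk kv) (hrnc : List.Pairwise Rnc ps)
    (hncr : List.Pairwise (fun a b => NCr a b.1.tail) ps)
    (hnm : ∀ kv ∈ ps, ¬ kv.1.tail <+: t)
    (h2 : ∀ ps' nm, (∀ kv ∈ ps', KeyOk kv) → List.Pairwise Rnc ps' →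
          List.Pairwise (fun a b => NCr a b.1.tail) ps' → (∀ kv ∈ ps', NCr kv nm) → ':' ∉ nm →
          ∀ i < nm.length, nm.drop i <+: List.foldl fRep t ps' → nm.drop i <+: t) :
    List.foldl fRep (':' :: t) ps = ':' :: List.foldl fRep t ps := by
  induction ps using List.reverseRecOn with
  | nil => rfl
  | append_singleton ps' kv ih =>
    have hk' : ∀ x ∈ ps', KeyOk x := fun x hx => hk x (by simp [hx])
    have hkv : KeyOk kv := hk kv (by simp)
    have hrnc' : List.Pairwise Rnc ps' := hrnc.sublist (by simp)
    have hncr' : List.Pairwise (fun a b => NCr a b.1.tail) ps' := hncr.sublist (by simp)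
    have hncrkv : ∀ x ∈ ps', NCr x kv.1.tail := by
      have := (List.pairwise_append.mp hncr).2.2
      exact fun x hx => this x hx kv (by simp)
    have htail : ¬ kv.1.tail <+: List.foldl fRep t ps' := by
      intro hp
      have hlen : 0 < kv.1.tail.length := List.length_pos_iff.mpr hkv.2.1
      have := h2 ps' kv.1.tail hk' hrnc' hncr' hncrkv hkv.2.2.1 0 hlen (by simpa using hp)
      exact hnm kv (by simp) (by simpa using this)
    rw [List.foldl_append, List.foldl_append, List.foldl_cons, List.foldl_cons,
      List.foldl_nil, List.foldl_nil]
    rw [ih hk' hrnc' hncr' (fun x hx => hnm x (by simp [hx]))]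
    show PySem.Chars.replace (':' :: List.foldl fRep t ps') kv.1 kv.2 = ':' :: fRep (List.foldl fRep t ps') kv
    have hnp : ¬ kv.1 <+: (':' :: List.foldl fRep t ps') := by
      rw [keyok_eq hkv]
      intro h
      exact htail (List.cons_prefix_cons.mp h).2
    rw [rep_cons_ne kv.1 kv.2 _ _ (keyok_ne hkv) (notpre hnp)]
    rfl

-- partial replace chains never create a name-prefix that was not already there
lemma master2 : ∀ N : Nat, ∀ s : List Char, s.length ≤ N →
    ∀ (ps : List (List Char × List Char)) (nm : List Char),
    (∀ kv ∈ ps, KeyOk kv) → List.Pairwise Rnc ps →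
    List.Pairwise (fun a b => NCr a b.1.tail) ps → (∀ kv ∈ ps, NCr kv nm) → ':' ∉ nm →
    ∀ i < nm.length, nm.drop i <+: List.foldl fRep s ps → nm.drop i <+: s := by
  intro N
  induction N with
  | zero =>
    intro s hs ps nm hk _ _ _ _ i hi hp
    have : s = [] := List.eq_nil_of_length_eq_zero (Nat.le_zero.mp hs)
    subst this
    rw [fold_nil ps hk] at hp
    rw [List.prefix_nil.mp hp]
  | succ N ihN =>
    intro s hs ps nm hk hrnc hncr hncrnm hcol i hi hp
    match s with
    | [] =>
      rw [fold_nil ps hk] at hp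
      rw [List.prefix_nil.mp hp]
    | c :: t =>
      have ht : t.length ≤ N := by simpa using hs
      by_cases hc : c = ':'
      · subst hc
        by_cases hex : ∃ kv ∈ ps, kv.1.tail <+: t
        · obtain ⟨kv, hmem, hpre⟩ := hex
          obtain ⟨ps₁, ps₂, hsplit⟩ := List.mem_iff_append.mp hmem
          obtain ⟨r, hr⟩ := hpre
          rw [hsplit, ← hr, match_decomp ps₁ ps₂ kv (hsplit ▸ hk) (hsplit ▸ hrnc) r] at hp
          have hcomp := List.prefix_or_prefix_of_prefix hp (List.prefix_append kv.2 _)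
          rcases hcomp with h | h
          · exact absurd h (hncrnm kv hmem i hi).1
          · exact absurd h (hncrnm kv hmem i hi).2
        · have hall : ∀ kv ∈ ps, ¬ kv.1.tail <+: t := fun kv hkv hp => hex ⟨kv, hkv, hp⟩
          rw [pass_colon t ps hk hrnc hncr hall
            (fun ps'' nm' hh1 hh2 hh3 hh4 hh5 j hj hpp => ihN t ht ps'' nm' hh1 hh2 hh3 hh4 hh5 j hj hpp)] at hp
          cases hd : nm.drop i with
          | nil => exact List.nil_prefix
          | cons a as =>
            rw [hd] at hp
            have ha : a = ':' := (List.cons_prefix_cons.mp hp).1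
            have hmem : a ∈ nm := List.mem_of_mem_drop (by rw [hd]; simp : a ∈ nm.drop i)
            rw [ha] at hmem
            exact absurd hmem hcol
      · rw [fold_cons_ne c hc ps hk t] at hp
        cases hd : nm.drop i with
        | nil => exact List.nil_prefix
        | cons a as =>
          rw [hd] at hp
          obtain ⟨hac, has⟩ := List.cons_prefix_cons.mp hp
          have hdrop1 : nm.drop (i+1) = as := by
            have : nm.drop (i+1) = (nm.drop i).drop 1 := by
              rw [List.drop_drop]
            rw [this, hd]
            rfl
          rw [hac]
          by_cases h1 : i + 1 < nm.length
          · have := ihN t ht ps nm hk hrnc hncr hncrnm hcol (i+1) h1 (by rw [hdrop1]; exact has)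
            rw [hdrop1] at this
            exact List.cons_prefix_cons.mpr ⟨rfl, this⟩
          · have : as = [] := by
              rw [← hdrop1]
              exact List.drop_eq_nil_iff.mpr (by omega)
            rw [this]
            exact List.cons_prefix_cons.mpr ⟨rfl, List.nil_prefix⟩

-- the full chain equals the single left-to-right scan
lemma master1 : ∀ (N : Nat) (s : List Char), s.length ≤ N →
    List.foldl fRep s pvTable = pvScan s := by
  intro N
  induction N with
  | zero =>
    intro s hs
    have : s = [] := List.eq_nil_of_length_eq_zero (Nat.le_zero.mp hs)
    subst this
    rw [fold_nil pvTable table_keyok, pvScan]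
  | succ N ihN =>
    intro s hs
    match s with
    | [] => rw [fold_nil pvTable table_keyok, pvScan]
    | c :: t =>
      have ht : t.length ≤ N := by simpa using hs
      by_cases hc : c = ':'
      · subst hc
        cases hfind : pvTable.find? (fun kv => kv.1.isPrefixOf (':' :: t)) with
        | some kv =>
          have hkv : kv ∈ pvTable := List.mem_of_find?_eq_some hfind
          have hpt : kv.1.isPrefixOf (':' :: t) = true :=
            List.find?_some (p := fun kv : List Char × List Char => kv.1.isPrefixOf (':' :: t)) hfind
          have hkok : KeyOk kv := table_keyok kv hkv
          have hpre : kv.1.tail <+: t := by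
            have := List.isPrefixOf_iff_prefix.mp hpt
            rw [keyok_eq hkok] at this
            exact (List.cons_prefix_cons.mp this).2
          obtain ⟨r, hr⟩ := hpre
          obtain ⟨ps₁, ps₂, hsplit⟩ := List.mem_iff_append.mp hkv
          have hrlen : r.length ≤ N := by
            have := congrArg List.length hr
            simp at this
            omega
          have hleft : List.foldl fRep (':' :: t) pvTable = kv.2 ++ List.foldl fRep r pvTable := by
            conv_lhs => rw [← hr, hsplit]
            rw [match_decomp ps₁ ps₂ kv (hsplit ▸ table_keyok) (hsplit ▸ table_rnc) r, ← hsplit]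
          have hdt : t.drop (kv.1.length - 1) = r := by
            have hlen : kv.1.length = kv.1.tail.length + 1 := by rw [keyok_eq hkok]; simp
            rw [hlen, Nat.add_sub_cancel, ← hr]
            exact List.drop_left
          rw [hleft, pvScan]
          simp [hfind, hdt, ihN r hrlen]
        | none =>
          have hnone : ∀ kv ∈ pvTable, ¬ kv.1.tail <+: t := by
            intro kv hkv hp
            have h1 := List.find?_eq_none.mp hfind kv hkv
            exact h1 (List.isPrefixOf_iff_prefix.mpr
              (by rw [keyok_eq (table_keyok kv hkv)]; exact List.cons_prefix_cons.mpr ⟨rfl, hp⟩))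
          rw [pass_colon t pvTable table_keyok table_rnc table_ncr hnone
            (fun ps'' nm' hh1 hh2 hh3 hh4 hh5 j hj hpp => master2 t.length t le_rfl ps'' nm' hh1 hh2 hh3 hh4 hh5 j hj hpp)]
          rw [pvScan]
          simp [hfind, ihN t ht]
      · rw [fold_cons_ne c hc pvTable table_keyok t, pvScan, if_neg hc, ihN t ht]

-- the scan copies ':'-free strings unchanged
lemma scan_id (s : List Char) (h : ':' ∉ s) : pvScan s = s := by
  induction s with
  | nil => rw [pvScan]
  | cons c t ih =>
    have hc : c ≠ ':' := by intro e; exact h (by simp [e])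
    rw [pvScan, if_neg hc, ih (fun hm => h (by simp [hm]))]

-- A's String-level fold is the List Char-level fold
lemma str_fold (l : List (String × String)) : ∀ cs : List Char,
    l.foldl (fun a kv => PySem.Str.replace a kv.1 kv.2) (String.ofList cs) =
      String.ofList (List.foldl fRep cs (l.map (fun kv => (kv.1.toList, kv.2.toList)))) := by
  induction l with
  | nil => intro cs; simp
  | cons kv l ih =>
    intro cs
    rw [List.foldl_cons, List.map_cons, List.foldl_cons]
    have hstep : PySem.Str.replace (String.ofList cs) kv.1 kv.2 =
        String.ofList (fRep cs (kv.1.toList, kv.2.toList)) := by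
      rw [PySem.Str.replace]
      simp [fRep, String.toList_ofList]
    rw [hstep, ih]

-- per endpoint, A's branch equals B's scan
lemma per_elem (e : String) :
    (if PySem.Str.isIn ":" e then
        pvReplaces.foldl (fun a kv => PySem.Str.replace a kv.1 kv.2) e
      else e) = String.ofList (pvScan e.toList) := by
  by_cases hin : PySem.Str.isIn ":" e = true
  · rw [if_pos hin]
    conv_lhs => rw [← String.ofList_toList (s := e)]
    rw [str_fold pvReplaces e.toList]
    rw [show pvReplaces.map (fun kv => (kv.1.toList, kv.2.toList)) = pvTable from rfl]
    rw [master1 e.toList.length e.toList le_rfl]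
  · rw [if_neg hin]
    have hns : ':' ∉ e.toList := by
      intro hm
      apply hin
      rw [PySem.Str.isIn_iff_infix]
      obtain ⟨l1, l2, hsplit⟩ := List.mem_iff_append.mp hm
      refine ⟨l1, l2, ?_⟩
      rw [hsplit, show (":".toList) = [':'] from rfl]
      simp
    rw [scan_id e.toList hns, String.ofList_toList]

-- the two endpoint loops agree for every accumulator
lemma fold_build (eps : List String) : ∀ acc : List String,
    eps.foldl (fun filled endpoint =>
      if PySem.Str.isIn ":" endpoint then
        filled ++ [pvReplaces.foldl (fun a kv => PySem.Str.replace a kv.1 kv.2) endpoint]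
      else filled ++ [endpoint]) acc =
    eps.foldl (fun filled endpoint => filled ++ [String.ofList (pvScan endpoint.toList)]) acc := by
  induction eps with
  | nil => intro acc; rfl
  | cons e eps ih =>
    intro acc
    rw [List.foldl_cons, List.foldl_cons]
    have hbody : (if PySem.Str.isIn ":" e then
          acc ++ [pvReplaces.foldl (fun a kv => PySem.Str.replace a kv.1 kv.2) e]
        else acc ++ [e]) = acc ++ [String.ofList (pvScan e.toList)] := by
      rw [← per_elem e]
      exact (apply_ite (fun x => acc ++ [x]) _ _ _).symm
    rw [hbody, ih]

-- ===== VERDICT (by name: the statement is the Claim_ definition above) =====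
theorem fill_ids_spec : Claim_equal_fill_ids :=
  fun endpoints _ => fold_build endpoints []
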